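-- pv_equiv track=rewrite | github.com/pypi-data/pypi-mirror-402 | packages/semantic-dom-ssg/semantic_dom_ssg-0.2.0.tar.gz/semantic_dom_ssg-0.2.0/semantic_dom_ssg/security.py | escape_css_identifier
-- ===== SOURCE A (Python) =====
-- def escape_css_identifier(identifier: str) -> str:
--     """Escape special characters for CSS selectors.
--
--     Args:
--         identifier: The string to escape
--
--     Returns:
--         The escaped string safe for use in CSS selectors
--     """
--     result = []
--     for i, char in enumerate(identifier):
--         # Characters that need escaping in CSS identifiers
--         if char in '!"#$%&\'()*+,./:;<=>?@[\\]^`{|}~':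
--             result.append(f"\\{char}")
--         # Digits at the start need escaping
--         elif char.isdigit() and i == 0:
--             result.append(f"\\3{char} ")
--         # Hyphen at start needs escaping
--         elif char == "-" and i == 0:
--             result.append("\\-")
--         else:
--             result.append(char)
--     return "".join(result)
-- ===== SOURCE B (Python) =====
-- _SPECIAL = '!"#$%&\'()*+,./:;<=>?@[\\]^`{|}~'
-- _TABLE = {ord(c): "\\" + c for c in _SPECIAL}
--
--
-- def escape_css_identifier(identifier: str) -> str:
--     """Escape special characters for CSS selectors (table-driven)."""
--     if not identifier:
--         return ""
--     c = identifier[0]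
--     if c in _SPECIAL:
--         head = "\\" + c
--     elif c.isdigit():
--         head = f"\\3{c} "
--     elif c == "-":
--         head = "\\-"
--     else:
--         head = c
--     return head + identifier[1:].translate(_TABLE)
-- ===== Notes on version B (the rewrite author's own statement) =====
-- stated objective: faster
-- what changed: Replaces the index-tracking loop that appends string pieces with a head/tail split: the three-way first-character logic runs once on identifier[0], and the rest is escaped by a precomputed str.translate table, removing the per-character Python-level loop and list/join machinery.
import Mathlib
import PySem

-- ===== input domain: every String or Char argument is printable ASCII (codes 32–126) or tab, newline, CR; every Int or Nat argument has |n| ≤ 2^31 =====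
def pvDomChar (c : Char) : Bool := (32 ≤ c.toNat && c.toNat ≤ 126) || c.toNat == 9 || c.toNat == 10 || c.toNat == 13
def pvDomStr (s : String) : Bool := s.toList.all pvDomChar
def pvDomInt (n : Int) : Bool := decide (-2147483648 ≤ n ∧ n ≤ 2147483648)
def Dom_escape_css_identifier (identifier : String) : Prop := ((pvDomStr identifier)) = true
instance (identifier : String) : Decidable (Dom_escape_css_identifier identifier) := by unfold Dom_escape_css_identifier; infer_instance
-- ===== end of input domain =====

-- B replaces A's index-tracking append loop by a head/tail split with a translation table (objective: more idiomatic).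

-- ===== PORT A =====
-- the special-character literal of A
def escCssSpecial : List Char := "!\"#$%&'()*+,./:;<=>?@[\\]^`{|}~".toList

-- one iteration of A's loop body: append the piece for (i, char) to result
def escCssStepA (acc : List (List Char)) (p : Int × Char) : List (List Char) :=
  if p.2 ∈ escCssSpecial then acc ++ [['\\', p.2]]
  else if PySem.Chars.isdigit p.2 = true ∧ p.1 = 0 then acc ++ [['\\', '3', p.2, ' ']]
  else if p.2 = '-' ∧ p.1 = 0 then acc ++ [['\\', '-']]
  else acc ++ [[p.2]]

def escape_css_identifier (identifier : String) : String :=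
  let result := (PySem.List.enumerate identifier.toList 0).foldl escCssStepA []
  String.mk (PySem.Chars.join [] result)

-- ===== PORT B =====
-- B's translation table, as the per-character mapping it applies to the tail
def escCssTrans (c : Char) : List Char :=
  if c ∈ escCssSpecial then ['\\', c] else [c]

-- B's three-way logic on the first character
def escCssHead (c : Char) : List Char :=
  if c ∈ escCssSpecial then ['\\', c]
  else if PySem.Chars.isdigit c = true then ['\\', '3', c, ' ']
  else if c = '-' then ['\\', '-']
  else [c]

def escape_css_identifier_alt (identifier : String) : String :=
  match identifier.toList with
  | [] => ""
  | c :: rest => String.mk (escCssHead c ++ rest.flatMap escCssTrans)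

-- ===== PRECONDITION & SPEC =====
def Spec_escape_css_identifier (identifier : String) (out : String) : Prop := out = escape_css_identifier_alt identifier
instance (identifier : String) (out : String) : Decidable (Spec_escape_css_identifier identifier out) := by unfold Spec_escape_css_identifier; infer_instance

-- ===== CLAIM (what is proved, stated in full; the proofs are below) =====
def Claim_equal_escape_css_identifier : Prop := ∀ (identifier : String), Dom_escape_css_identifier identifier → Spec_escape_css_identifier identifier (escape_css_identifier identifier)

-- ===== LEMMAS AND PROOFS =====

-- past index 0, A's loop body appends exactly B's table translation of the character
lemma escCssStepA_tail (acc : List (List Char)) (i : Int) (c : Char) (hi : i ≠ 0) :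
    escCssStepA acc (i, c) = acc ++ [escCssTrans c] := by
  simp only [escCssStepA, escCssTrans]
  split_ifs with h1 h2 h3 <;> simp_all

-- A's fold over the tail (indices starting at s ≠ 0) appends the translations of the tail
lemma escCss_foldl_tail (rest : List Char) : ∀ (acc : List (List Char)) (s : Int), 0 < s →
    (PySem.List.enumerate rest s).foldl escCssStepA acc = acc ++ rest.map escCssTrans := by
  induction rest with
  | nil => intro acc s _; simp [PySem.List.enumerate_nil]
  | cons c rest ih =>
      intro acc s hs
      rw [PySem.List.enumerate_cons, List.foldl_cons, escCssStepA_tail acc s c (by omega),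
        ih (acc ++ [escCssTrans c]) (s + 1) (by omega)]
      simp

-- joining with the empty separator is flattening
lemma escCss_join_nil (parts : List (List Char)) :
    PySem.Chars.join [] parts = parts.flatten := by
  induction parts with
  | nil => simp [PySem.Chars.join, List.intercalate]
  | cons p parts ih =>
      cases parts with
      | nil => simp [PySem.Chars.join, List.intercalate]
      | cons q parts => simpa [PySem.Chars.join_cons_cons] using ih

-- at index 0, A's loop body produces exactly B's head piece
lemma escCssStepA_head (c : Char) : escCssStepA [] (0, c) = [escCssHead c] := by
  simp only [escCssStepA, escCssHead]
  split_ifs with h1 h2 h3 <;> simp_all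

-- ===== VERDICT (by name: the statement is the Claim_ definition above) =====
theorem escape_css_identifier_spec : Claim_equal_escape_css_identifier := by
  intro identifier _
  unfold Spec_escape_css_identifier escape_css_identifier escape_css_identifier_alt
  cases h : identifier.toList with
  | nil =>
      simp only [PySem.List.enumerate_nil, List.foldl_nil]
      rfl
  | cons c rest =>
      simp only [PySem.List.enumerate_cons, List.foldl_cons, escCssStepA_head, zero_add]
      rw [escCss_foldl_tail rest [escCssHead c] 1 (by omega), escCss_join_nil]
      simp [List.flatMap_def]
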